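-- pv_equiv track=rewrite | github.com/jstentz/cbot | src/openingFormatting/fileFormatting.py | formatGame
-- ===== SOURCE A (Python) =====
-- import string, os
--
-- def formatGame(contents):
--     result = ""
--     for line in contents.splitlines():
--         if(line in string.whitespace):
--             result += "\n"
--         elif(line[0].isnumeric()):
--             result += line
--             result += " "
--     finalResult = ""
--     for line in result.splitlines():
--         if(line == ''): continue
--         newLine = ""
--         for move in line.split(" "):
--             if(move == "1-0" or move == "0-1" or move == "1/2-1/2" or move.isspace()):
--                 continue
--             if("." in move):
--                 move = move[move.index(".")+1:]
--             newLine += move + " "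
--         finalResult += newLine + "\n"
--     return finalResult
-- ===== SOURCE B (Python) =====
-- import string
--
-- def _moveText(move):
--     if move == "1-0" or move == "0-1" or move == "1/2-1/2" or move.isspace():
--         return ""
--     if "." in move:
--         move = move[move.index(".")+1:]
--     return move + " "
--
-- def formatGame(contents):
--     out = []
--     currentMoves = []
--     for line in contents.splitlines():
--         if line in string.whitespace:
--             if currentMoves:
--                 out.append("".join(_moveText(m) for m in currentMoves) + " \n")
--                 currentMoves = []
--         elif line[0].isnumeric():
--             currentMoves.extend(line.split(" "))
--     if currentMoves:
--         out.append("".join(_moveText(m) for m in currentMoves) + " \n")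
--     return "".join(out)
-- ===== Notes on version B (the rewrite author's own statement) =====
-- stated objective: alternative
-- what changed: B replaces A's two-pass scheme (build an intermediate `result` string of numeric lines and blank markers, then re-splitlines and re-split it) with a single pass over contents.splitlines() that accumulates the current group's move tokens in a list and flushes them as one processed output line at each whitespace line and at the end.
import Mathlib
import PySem

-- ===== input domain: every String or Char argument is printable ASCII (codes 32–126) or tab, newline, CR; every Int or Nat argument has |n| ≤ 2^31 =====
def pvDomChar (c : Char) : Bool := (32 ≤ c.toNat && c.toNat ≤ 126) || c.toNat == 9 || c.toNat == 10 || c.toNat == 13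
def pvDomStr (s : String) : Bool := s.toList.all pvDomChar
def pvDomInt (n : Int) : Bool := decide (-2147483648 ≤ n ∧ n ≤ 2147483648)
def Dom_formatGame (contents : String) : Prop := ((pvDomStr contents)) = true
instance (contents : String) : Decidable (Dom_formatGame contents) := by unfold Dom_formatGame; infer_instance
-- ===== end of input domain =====

-- B re-implements A in one pass: instead of building an intermediate `result` string and re-splitting it,
-- B keeps an accumulator of the pending group's move tokens and flushes it at each whitespace line (and at the end).
-- Objective: alternative decomposition (same O(n) cost, no intermediate string).

-- ===== PORT A =====
-- string.whitespace
def pvWS : List Char := [' ', '\t', '\n', '\r', '\x0b', '\x0c']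
def pvTokWhiteWin : List Char := ['1', '-', '0']
def pvTokBlackWin : List Char := ['0', '-', '1']
def pvTokDraw : List Char := ['1', '/', '2', '-', '1', '/', '2']

-- body of A's inner `for move in line.split(" ")` loop (newLine accumulator; `move[move.index(".")+1:]` is the slice)
def pvMoveStepA (newLine : List Char) (move : List Char) : List Char :=
  if move = pvTokWhiteWin ∨ move = pvTokBlackWin ∨ move = pvTokDraw ∨ PySem.Chars.strIsspace move = true then
    newLine
  else
    newLine ++ (if PySem.Chars.isIn ['.'] move = true then
        PySem.List.slice move (some (PySem.Chars.find move ['.'] + 1)) none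
      else move) ++ [' ']

-- `line[0].isnumeric()`: on printable ASCII isnumeric coincides with isdigit; the line is never empty here
-- (the empty line is caught by the `line in string.whitespace` branch), so pyGet?/Option.any is exact.
def formatGame (contents : String) : String :=
  let result : List Char :=
    (PySem.Chars.splitlines contents.toList).foldl
      (fun result line =>
        if PySem.Chars.isIn line pvWS = true then result ++ ['\n']
        else if (PySem.List.pyGet? line 0).any PySem.Chars.isdigit = true then result ++ line ++ [' ']
        else result) []
  let finalResult : List Char :=
    (PySem.Chars.splitlines result).foldl
      (fun finalResult line =>
        if line = [] then finalResult
        else finalResult ++ (PySem.Chars.splitOn line [' ']).foldl pvMoveStepA [] ++ ['\n']) []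
  String.ofList finalResult

-- ===== PORT B =====
-- B's `_moveText(move)`: the text a single token contributes to its output line
def pvMoveText (move : List Char) : List Char :=
  if move = pvTokWhiteWin ∨ move = pvTokBlackWin ∨ move = pvTokDraw ∨ PySem.Chars.strIsspace move = true then []
  else
    (if PySem.Chars.isIn ['.'] move = true then
        PySem.List.slice move (some (PySem.Chars.find move ['.'] + 1)) none
      else move) ++ [' ']

-- flush the pending token group as one output line (B's `if currentMoves: out.append(...)`)
def pvFlush (out : List Char) (cur : List (List Char)) : List Char :=
  if cur = [] then out else out ++ (cur.map pvMoveText).flatten ++ [' ', '\n']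

-- body of B's single `for line in contents.splitlines()` loop; state = (out, currentMoves)
def pvStepB (st : List Char × List (List Char)) (line : List Char) : List Char × List (List Char) :=
  if PySem.Chars.isIn line pvWS = true then (pvFlush st.1 st.2, [])
  else if (PySem.List.pyGet? line 0).any PySem.Chars.isdigit = true then
    (st.1, st.2 ++ PySem.Chars.splitOn line [' '])
  else st

def formatGame_alt (contents : String) : String :=
  let st := (PySem.Chars.splitlines contents.toList).foldl pvStepB ([], [])
  String.ofList (pvFlush st.1 st.2)

-- ===== PRECONDITION & SPEC =====
def Spec_formatGame (contents : String) (out : String) : Prop := out = formatGame_alt contents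
instance (contents : String) (out : String) : Decidable (Spec_formatGame contents out) := by unfold Spec_formatGame; infer_instance

-- ===== CLAIM (what is proved, stated in full; the proofs are below) =====
def Claim_equal_formatGame : Prop := ∀ (contents : String), Dom_formatGame contents → Spec_formatGame contents (formatGame contents)

-- ===== LEMMAS AND PROOFS =====

-- the break-character test of PySem.Chars.splitlines
def pvIsB (c : Char) : Bool :=
  have n := c.toNat
  decide (n = 10) || decide (n = 13) || decide (n = 11) || decide (n = 12) || decide (n = 28) || decide (n = 29) ||
    decide (n = 30) || decide (n = 133) || decide (n = 8232) || decide (n = 8233)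

theorem sl_eq (s : List Char) : PySem.Chars.splitlines s = PySem.Chars.splitlines.go pvIsB s [] [] := rfl

-- prepend a break-free chunk to the first line of a line list
def pvPrep (p : List Char) (ls : List (List Char)) : List (List Char) :=
  match ls with
  | [] => if p = [] then [] else [p]
  | h :: t => (p ++ h) :: t


theorem pvPrep_nil (ls : List (List Char)) : pvPrep [] ls = ls := by
  cases ls <;> simp [pvPrep]

theorem pvPrep_comp (p q : List Char) (ls : List (List Char)) (hq : q ≠ []) :
    pvPrep p (pvPrep q ls) = pvPrep (p ++ q) ls := by
  cases ls <;> simp [pvPrep, hq]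

theorem sl_step (c : Char) (rest cur : List Char) (acc : List (List Char))
    (h : c = '\r' → ∀ r, rest ≠ '\n' :: r) :
    PySem.Chars.splitlines.go pvIsB (c :: rest) cur acc =
      if pvIsB c then PySem.Chars.splitlines.go pvIsB rest [] (cur.reverse :: acc)
      else PySem.Chars.splitlines.go pvIsB rest (c :: cur) acc := by
  cases rest with
  | nil => simp [PySem.Chars.splitlines.go, pvIsB]
  | cons d t =>
    by_cases hc : c = '\r'
    · have hd : d ≠ '\n' := by intro hd; exact h hc t (by rw [hd])
      subst hc; simp [PySem.Chars.splitlines.go, hd, pvIsB]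
    · by_cases hd : d = '\n' <;> simp [PySem.Chars.splitlines.go, hc, hd]

theorem sl_go_aux : ∀ (n : Nat) (s : List Char), s.length ≤ n → ∀ (cur : List Char) (acc : List (List Char)),
    PySem.Chars.splitlines.go pvIsB s cur acc = acc.reverse ++ pvPrep cur.reverse (PySem.Chars.splitlines s) := by
  intro n
  induction n with
  | zero =>
    intro s hs cur acc
    have : s = [] := List.eq_nil_of_length_eq_zero (Nat.le_zero.mp hs)
    subst this
    by_cases h : cur = [] <;>
      simp [PySem.Chars.splitlines.go, sl_eq, pvPrep, h, List.isEmpty_iff]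
  | succ n ih =>
    intro s hs cur acc
    cases s with
    | nil =>
      by_cases h : cur = [] <;>
        simp [PySem.Chars.splitlines.go, sl_eq, pvPrep, h, List.isEmpty_iff]
    | cons c rest =>
      have hlen : rest.length ≤ n := by simp at hs; omega
      by_cases special : c = '\r' ∧ ∃ r, rest = '\n' :: r
      · obtain ⟨hc, r, hr⟩ := special
        subst hc; subst hr
        have hlen2 : r.length ≤ n := by simp at hs; omega
        rw [show PySem.Chars.splitlines.go pvIsB ('\r' :: '\n' :: r) cur acc =
              PySem.Chars.splitlines.go pvIsB r [] (cur.reverse :: acc) by simp [PySem.Chars.splitlines.go]]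
        rw [ih r hlen2 [] (cur.reverse :: acc)]
        have hsl : PySem.Chars.splitlines ('\r' :: '\n' :: r) = [] :: PySem.Chars.splitlines r := by
          rw [sl_eq]
          rw [show PySem.Chars.splitlines.go pvIsB ('\r' :: '\n' :: r) [] [] =
              PySem.Chars.splitlines.go pvIsB r [] [[]] by simp [PySem.Chars.splitlines.go]]
          rw [ih r hlen2 [] [[]]]
          simp [pvPrep_nil]
        rw [hsl]
        cases PySem.Chars.splitlines r <;> simp [pvPrep]
      · have h' : c = '\r' → ∀ r, rest ≠ '\n' :: r := by
          intro hc r hr; exact special ⟨hc, r, hr⟩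
        rw [sl_step c rest cur acc h']
        have hslstep := sl_step c rest [] [] h'
        simp only [List.reverse_nil] at hslstep
        by_cases hB : pvIsB c = true
        · rw [if_pos hB, ih rest hlen [] (cur.reverse :: acc)]
          have hsl : PySem.Chars.splitlines (c :: rest) = [] :: PySem.Chars.splitlines rest := by
            rw [sl_eq, hslstep, if_pos hB, ih rest hlen [] [[]]]
            simp [pvPrep_nil]
          rw [hsl]
          cases PySem.Chars.splitlines rest <;> simp [pvPrep]
        · rw [if_neg hB, ih rest hlen (c :: cur) acc]
          have hsl : PySem.Chars.splitlines (c :: rest) = pvPrep [c] (PySem.Chars.splitlines rest) := by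
            rw [sl_eq, hslstep, if_neg hB, ih rest hlen [c] []]
            simp
          rw [hsl, pvPrep_comp _ [c] _ (by simp)]
          simp

theorem sl_nil : PySem.Chars.splitlines ([] : List Char) = [] := rfl

theorem sl_cons_break (c : Char) (s : List Char) (hB : pvIsB c = true)
    (h : c = '\r' → ∀ r, s ≠ '\n' :: r) :
    PySem.Chars.splitlines (c :: s) = [] :: PySem.Chars.splitlines s := by
  rw [sl_eq, sl_step c s [] [] h, if_pos hB]
  rw [sl_go_aux s.length s le_rfl [] [[].reverse]]
  simp [pvPrep_nil]

theorem sl_newline (s : List Char) : PySem.Chars.splitlines ('\n' :: s) = [] :: PySem.Chars.splitlines s :=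
  sl_cons_break '\n' s (by decide) (by intro h; exact absurd h (by decide))

theorem sl_clean_append (p s : List Char) (hp : ∀ c ∈ p, pvIsB c = false) :
    PySem.Chars.splitlines (p ++ s) = pvPrep p (PySem.Chars.splitlines s) := by
  induction p with
  | nil => simp [pvPrep_nil]
  | cons c p' ih =>
    have hc : pvIsB c = false := hp c (by simp)
    have hcr : c ≠ '\r' := by intro h; subst h; exact absurd hc (by decide)
    have hstep : PySem.Chars.splitlines (c :: (p' ++ s)) = pvPrep [c] (PySem.Chars.splitlines (p' ++ s)) := by
      rw [sl_eq, sl_step c (p' ++ s) [] [] (fun h => absurd h hcr), if_neg (by simp [hc])]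
      rw [sl_go_aux (p' ++ s).length (p' ++ s) le_rfl [c] []]
      simp
    rw [List.cons_append, hstep, ih (fun c hc => hp c (by simp [hc]))]
    cases hp' : p' with
    | nil => simp [pvPrep_nil]
    | cons d t => rw [← hp', pvPrep_comp _ _ _ (by simp [hp'])]; simp

theorem sl_mem_aux : ∀ (n : Nat) (s : List Char), s.length ≤ n →
    ∀ (cur : List Char) (acc : List (List Char)),
    (∀ c ∈ cur, pvIsB c = false) → (∀ l ∈ acc, ∀ c ∈ l, pvIsB c = false) →
    ∀ l ∈ PySem.Chars.splitlines.go pvIsB s cur acc, ∀ c ∈ l, pvIsB c = false := by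
  intro n
  induction n with
  | zero =>
    intro s hs cur acc hcur hacc l hl
    have : s = [] := List.eq_nil_of_length_eq_zero (Nat.le_zero.mp hs)
    subst this
    simp only [PySem.Chars.splitlines.go] at hl
    split at hl
    · exact hacc l (by simpa using hl)
    · simp at hl
      rcases hl with h | h
      · exact hacc l h
      · subst h; intro c hc; exact hcur c (List.mem_reverse.mp hc)
  | succ n ih =>
    intro s hs cur acc hcur hacc l hl
    cases s with
    | nil =>
      simp only [PySem.Chars.splitlines.go] at hl
      split at hl
      · exact hacc l (by simpa using hl)
      · simp at hl
        rcases hl with h | h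
        · exact hacc l h
        · subst h; intro c hc; exact hcur c (List.mem_reverse.mp hc)
    | cons c rest =>
      have hlen : rest.length ≤ n := by simp at hs; omega
      by_cases special : c = '\r' ∧ ∃ r, rest = '\n' :: r
      · obtain ⟨hc, r, hr⟩ := special
        subst hc; subst hr
        have hlen2 : r.length ≤ n := by simp at hs; omega
        rw [show PySem.Chars.splitlines.go pvIsB ('\r' :: '\n' :: r) cur acc =
              PySem.Chars.splitlines.go pvIsB r [] (cur.reverse :: acc) by simp [PySem.Chars.splitlines.go]] at hl
        refine ih r hlen2 [] (cur.reverse :: acc) (by simp) ?_ l hl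
        intro l' hl' c' hc'
        rcases List.mem_cons.mp hl' with h | h
        · subst h; exact hcur c' (List.mem_reverse.mp hc')
        · exact hacc l' h c' hc'
      · have h' : c = '\r' → ∀ r, rest ≠ '\n' :: r := by
          intro hc r hr; exact special ⟨hc, r, hr⟩
        rw [sl_step c rest cur acc h'] at hl
        by_cases hB : pvIsB c = true
        · rw [if_pos hB] at hl
          refine ih rest hlen [] (cur.reverse :: acc) (by simp) ?_ l hl
          intro l' hl' c' hc'
          rcases List.mem_cons.mp hl' with h | h
          · subst h; exact hcur c' (List.mem_reverse.mp hc')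
          · exact hacc l' h c' hc'
        · rw [if_neg hB] at hl
          refine ih rest hlen (c :: cur) acc ?_ hacc l hl
          intro c' hc'
          rcases List.mem_cons.mp hc' with h | h
          · subst h; exact Bool.not_eq_true _ ▸ (by simpa using hB)
          · exact hcur c' h

theorem sl_mem_clean (s : List Char) : ∀ l ∈ PySem.Chars.splitlines s, ∀ c ∈ l, pvIsB c = false := by
  rw [sl_eq]
  exact sl_mem_aux s.length s le_rfl [] [] (by simp) (by simp)

def pvSplitGo : List Char → List Char → List (List Char) → List (List Char)
  | [], cur, acc => (cur.reverse :: acc).reverse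
  | c :: rest, cur, acc =>
    if c = ' ' then pvSplitGo rest [] (cur.reverse :: acc) else pvSplitGo rest (c :: cur) acc

theorem pvSplitGo_eq_go : ∀ (f : Nat) (l : List Char), l.length < f → ∀ (cur : List Char) (acc : List (List Char)),
    PySem.Chars.splitOn.go [' '] f l cur acc = pvSplitGo l cur acc := by
  intro f
  induction f with
  | zero => intro l h; omega
  | succ f ih =>
    intro l h cur acc
    cases l with
    | nil => simp [PySem.Chars.splitOn.go, pvSplitGo]
    | cons c rest =>
      by_cases hc : c = ' '
      · subst hc
        rw [show PySem.Chars.splitOn.go [' '] (f + 1) (' ' :: rest) cur acc =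
              PySem.Chars.splitOn.go [' '] f rest [] (cur.reverse :: acc) by
            simp [PySem.Chars.splitOn.go, List.isPrefixOf]]
        rw [ih rest (by simp at h; omega) [] (cur.reverse :: acc)]
        simp [pvSplitGo]
      · rw [show PySem.Chars.splitOn.go [' '] (f + 1) (c :: rest) cur acc =
              PySem.Chars.splitOn.go [' '] f rest (c :: cur) acc by
            simp [PySem.Chars.splitOn.go, List.isPrefixOf, Ne.symm hc]]
        rw [ih rest (by simp at h; omega) (c :: cur) acc]
        simp [pvSplitGo, hc]

theorem splitOn_sp (l : List Char) : PySem.Chars.splitOn l [' '] = pvSplitGo l [] [] := by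
  rw [show PySem.Chars.splitOn l [' '] = PySem.Chars.splitOn.go [' '] (l.length + 1) l [] [] from rfl]
  exact pvSplitGo_eq_go (l.length + 1) l (by omega) [] []

theorem pvSplitGo_acc : ∀ (l : List Char) (cur : List Char) (acc : List (List Char)),
    pvSplitGo l cur acc = acc.reverse ++ pvSplitGo l cur [] := by
  intro l
  induction l with
  | nil => intro cur acc; simp [pvSplitGo]
  | cons c rest ih =>
    intro cur acc
    by_cases hc : c = ' '
    · subst hc
      simp only [pvSplitGo, if_true]
      rw [ih [] (cur.reverse :: acc), ih [] [cur.reverse]]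
      simp
    · simp only [pvSplitGo, if_neg hc]
      exact ih (c :: cur) acc

theorem pvSplitGo_append (y : List Char) : ∀ (x : List Char) (cur : List Char) (acc : List (List Char)),
    pvSplitGo (x ++ ' ' :: y) cur acc = pvSplitGo y [] ((pvSplitGo x cur acc).reverse) := by
  intro x
  induction x with
  | nil => intro cur acc; simp [pvSplitGo]
  | cons c rest ih =>
    intro cur acc
    by_cases hc : c = ' '
    · subst hc; simp only [List.cons_append, pvSplitGo, ite_true]; exact ih [] (cur.reverse :: acc)
    · simp only [List.cons_append, pvSplitGo, if_neg hc]; exact ih (c :: cur) acc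

theorem splitOn_sp_append (x y : List Char) :
    PySem.Chars.splitOn (x ++ ' ' :: y) [' '] = PySem.Chars.splitOn x [' '] ++ PySem.Chars.splitOn y [' '] := by
  rw [splitOn_sp, splitOn_sp, splitOn_sp, pvSplitGo_append]
  rw [pvSplitGo_acc y [] ((pvSplitGo x [] []).reverse)]
  simp

theorem pvSplitGo_ne_nil : ∀ (l : List Char) (cur : List Char) (acc : List (List Char)),
    pvSplitGo l cur acc ≠ [] := by
  intro l
  induction l with
  | nil => intro cur acc; simp [pvSplitGo]
  | cons c rest ih =>
    intro cur acc
    by_cases hc : c = ' ' <;> simp only [pvSplitGo, hc, if_pos, ite_false] <;> apply ih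

theorem splitOn_sp_nil : PySem.Chars.splitOn ([] : List Char) [' '] = [[]] := rfl

theorem splitOn_sp_ne_nil (l : List Char) : PySem.Chars.splitOn l [' '] ≠ [] := by
  rw [splitOn_sp]; exact pvSplitGo_ne_nil l [] []

-- ===== the two programs, rephrased =====

-- what one input line contributes to A's intermediate `result` string
def pvGLine (line : List Char) : List Char :=
  if PySem.Chars.isIn line pvWS = true then ['\n']
  else if (PySem.List.pyGet? line 0).any PySem.Chars.isdigit = true then line ++ [' ']
  else []

-- A's second loop, as a flatMap over the lines of `result`
def pvA2 (lines : List (List Char)) : List Char :=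
  lines.flatMap (fun line =>
    if line = [] then [] else (PySem.Chars.splitOn line [' ']).foldl pvMoveStepA [] ++ ['\n'])

-- the `result`-chunk and the token list of a pending group of numeric lines
def pvStr (pend : List (List Char)) : List Char := pend.flatMap (fun l => l ++ [' '])
def pvCur (pend : List (List Char)) : List (List Char) :=
  pend.flatMap (fun l => PySem.Chars.splitOn l [' '])

theorem pvMoveStepA_eq (newLine move : List Char) :
    pvMoveStepA newLine move = newLine ++ pvMoveText move := by
  unfold pvMoveStepA pvMoveText
  split_ifs <;> simp

theorem lineFold_eq (line : List Char) :
    (PySem.Chars.splitOn line [' ']).foldl pvMoveStepA [] =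
      (PySem.Chars.splitOn line [' ']).flatMap pvMoveText := by
  rw [PySem.List.foldl_congr_mem _ _ (fun acc mv => acc ++ pvMoveText mv) _
        (fun acc x _ => pvMoveStepA_eq acc x),
      PySem.List.foldl_append_eq_flatMap]
  simp

theorem pvA2_cons (x : List Char) (t : List (List Char)) :
    pvA2 (x :: t) = (if x = [] then [] else (PySem.Chars.splitOn x [' ']).foldl pvMoveStepA [] ++ ['\n']) ++ pvA2 t := by
  simp [pvA2]

theorem resultA_eq (ls : List (List Char)) :
    ls.foldl (fun result line =>
        if PySem.Chars.isIn line pvWS = true then result ++ ['\n']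
        else if (PySem.List.pyGet? line 0).any PySem.Chars.isdigit = true then result ++ line ++ [' ']
        else result) [] = ls.flatMap pvGLine := by
  rw [PySem.List.foldl_congr_mem _ _ (fun acc line => acc ++ pvGLine line) _
        (by intro acc line _; unfold pvGLine; split_ifs <;> simp_all),
      PySem.List.foldl_append_eq_flatMap]
  simp

theorem secondA_eq (lines : List (List Char)) :
    lines.foldl (fun finalResult line =>
        if line = [] then finalResult
        else finalResult ++ (PySem.Chars.splitOn line [' ']).foldl pvMoveStepA [] ++ ['\n']) [] = pvA2 lines := by
  rw [PySem.List.foldl_congr_mem _ _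
        (fun acc line => acc ++ (if line = [] then [] else (PySem.Chars.splitOn line [' ']).foldl pvMoveStepA [] ++ ['\n'])) _
        (by intro acc line _; split_ifs <;> simp [*]),
      PySem.List.foldl_append_eq_flatMap]
  simp [pvA2]

theorem splitOn_pvStr (pend : List (List Char)) :
    PySem.Chars.splitOn (pvStr pend) [' '] = pvCur pend ++ [[]] := by
  induction pend with
  | nil => simp [pvStr, pvCur, splitOn_sp_nil]
  | cons l p ih =>
    have : pvStr (l :: p) = l ++ ' ' :: pvStr p := by simp [pvStr]
    rw [this, splitOn_sp_append, ih]
    simp [pvCur]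

theorem pvMoveText_nil : pvMoveText [] = [' '] := by decide

theorem pvStr_ne_nil (l : List Char) (p : List (List Char)) : pvStr (l :: p) ≠ [] := by
  simp [pvStr]

theorem pvCur_ne_nil (l : List Char) (p : List (List Char)) : pvCur (l :: p) ≠ [] := by
  simp only [pvCur, List.flatMap_cons]
  intro h
  rcases List.append_eq_nil_iff.mp h with ⟨h1, _⟩
  exact splitOn_sp_ne_nil l h1

-- the pending group, flushed, is exactly what A's second loop makes of its `result` line
theorem pvFlush_group (out : List Char) (pend : List (List Char)) :
    pvFlush out (pvCur pend) =
      out ++ (if pvStr pend = [] then []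
              else (PySem.Chars.splitOn (pvStr pend) [' ']).foldl pvMoveStepA [] ++ ['\n']) := by
  cases pend with
  | nil => simp [pvFlush, pvCur, pvStr]
  | cons l p =>
    rw [if_neg (pvStr_ne_nil l p), pvFlush, if_neg (pvCur_ne_nil l p)]
    rw [lineFold_eq, splitOn_pvStr]
    simp [pvMoveText_nil, List.flatMap]

-- master invariant: B's loop from state (out, tokens of pend) computes A's answer for pend's chunk ++ the rest
theorem master : ∀ (ls : List (List Char)), (∀ l ∈ ls, ∀ c ∈ l, pvIsB c = false) →
    ∀ (pend : List (List Char)) (out : List Char),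
    pvFlush (ls.foldl pvStepB (out, pvCur pend)).1 (ls.foldl pvStepB (out, pvCur pend)).2 =
      out ++ pvA2 (pvPrep (pvStr pend) (PySem.Chars.splitlines (ls.flatMap pvGLine))) := by
  intro ls
  induction ls with
  | nil =>
    intro _ pend out
    simp only [List.foldl_nil, List.flatMap_nil, sl_nil]
    rw [pvFlush_group]
    cases pend with
    | nil => simp [pvStr, pvPrep, pvA2]
    | cons l p =>
      rw [show pvPrep (pvStr (l :: p)) [] = [pvStr (l :: p)] by
            simp [pvPrep, pvStr_ne_nil l p]]
      rw [pvA2_cons, if_neg (pvStr_ne_nil l p)]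
      simp [pvA2]
  | cons l t ih =>
    intro hcl pend out
    have hclt : ∀ l' ∈ t, ∀ c ∈ l', pvIsB c = false := fun l' h => hcl l' (List.mem_cons_of_mem l h)
    simp only [List.foldl_cons, List.flatMap_cons]
    by_cases hW : PySem.Chars.isIn l pvWS = true
    · have hstep : pvStepB (out, pvCur pend) l = (pvFlush out (pvCur pend), pvCur []) := by
        simp [pvStepB, hW, pvCur]
      rw [hstep, ih hclt [] (pvFlush out (pvCur pend))]
      have hg : pvGLine l = ['\n'] := by simp [pvGLine, hW]
      rw [hg, show (['\n'] ++ t.flatMap pvGLine) = '\n' :: t.flatMap pvGLine by simp, sl_newline]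
      rw [show pvPrep (pvStr pend) ([] :: PySem.Chars.splitlines (t.flatMap pvGLine)) =
            pvStr pend :: PySem.Chars.splitlines (t.flatMap pvGLine) by simp [pvPrep]]
      rw [pvA2_cons, pvFlush_group]
      rw [show pvStr ([] : List (List Char)) = [] from rfl, pvPrep_nil]
      simp
    · by_cases hN : (PySem.List.pyGet? l 0).any PySem.Chars.isdigit = true
      · have hstep : pvStepB (out, pvCur pend) l = (out, pvCur (pend ++ [l])) := by
          simp [pvStepB, hW, hN, pvCur]
        rw [hstep, ih hclt (pend ++ [l]) out]
        have hg : pvGLine l = l ++ [' '] := by simp [pvGLine, hW, hN]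
        rw [hg]
        have hclean : ∀ c ∈ l ++ [' '], pvIsB c = false := by
          intro c hc
          rcases List.mem_append.mp hc with h | h
          · exact hcl l (by simp) c h
          · simp at h; subst h; decide
        rw [show (l ++ [' ']) ++ t.flatMap pvGLine = (l ++ [' ']) ++ t.flatMap pvGLine from rfl,
            sl_clean_append (l ++ [' ']) _ hclean]
        rw [pvPrep_comp _ _ _ (by simp)]
        rw [show pvStr pend ++ (l ++ [' ']) = pvStr (pend ++ [l]) by simp [pvStr]]
      · have hstep : pvStepB (out, pvCur pend) l = (out, pvCur pend) := by
          simp [pvStepB, hW, hN]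
        have hg : pvGLine l = [] := by simp [pvGLine, hW, hN]
        rw [hstep, ih hclt pend out, hg]
        simp

-- ===== VERDICT (by name: the statement is the Claim_ definition above) =====
theorem formatGame_spec : Claim_equal_formatGame := by
  unfold Claim_equal_formatGame
  intro contents _
  unfold Spec_formatGame formatGame formatGame_alt
  simp only [resultA_eq, secondA_eq]
  have hm := master (PySem.Chars.splitlines contents.toList)
    (sl_mem_clean contents.toList) [] []
  rw [show pvCur ([] : List (List Char)) = [] from rfl] at hm
  rw [hm, show pvStr ([] : List (List Char)) = [] from rfl, pvPrep_nil]
  simp
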